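-- pv_equiv track=rewrite | github.com/selner/notepublisher | notepublisher/exportnote.py | scrub_path
-- ===== SOURCE A (Python) =====
-- def scrub_path(pathpart, lowercase=False):
--     assert (pathpart)
--
--     for c in r'[]/\;,><&*:%=+@!#^()|?^':
--         pathpart = pathpart.replace(c, u'')
--
--     pathpart = pathpart.replace(u' ', u'_')
--
--     if lowercase:
--         pathpart = pathpart.lower()
--
--     return pathpart
-- ===== SOURCE B (Python) =====
-- _TABLE = {ord(c): None for c in r'[]/\;,><&*:%=+@!#^()|?^'}
-- _TABLE[ord(' ')] = '_'
--
-- def scrub_path(pathpart, lowercase=False):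
--     assert (pathpart)
--     result = pathpart.translate(_TABLE)
--     if lowercase:
--         result = result.lower()
--     return result
-- ===== Notes on version B (the rewrite author's own statement) =====
-- stated objective: faster
-- what changed: Replaces the 24 sequential full-string .replace() passes with a translation table built once and a single str.translate pass that drops each forbidden character and maps each space to an underscore.
import Mathlib
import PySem

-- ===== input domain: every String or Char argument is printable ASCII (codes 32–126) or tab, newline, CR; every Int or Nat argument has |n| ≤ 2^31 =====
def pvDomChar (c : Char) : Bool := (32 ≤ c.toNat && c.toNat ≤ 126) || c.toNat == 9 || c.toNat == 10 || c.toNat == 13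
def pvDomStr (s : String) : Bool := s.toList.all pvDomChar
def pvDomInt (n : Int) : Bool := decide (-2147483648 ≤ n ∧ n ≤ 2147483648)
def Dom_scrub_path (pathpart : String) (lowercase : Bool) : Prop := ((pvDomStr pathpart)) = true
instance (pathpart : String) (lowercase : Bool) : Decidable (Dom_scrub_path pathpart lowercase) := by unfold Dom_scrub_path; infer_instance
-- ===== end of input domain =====

-- B replaces A's 24 sequential full-string replace passes with one table-driven pass (str.translate).

-- ===== PORT A =====
-- the characters of the raw string r'[]/\;,><&*:%=+@!#^()|?^' in order ('^' occurs twice, as in A)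
def scrubForbidden : List Char := "[]/\\;,><&*:%=+@!#^()|?^".toList

def scrub_path (pathpart : String) (lowercase : Bool) : String :=
  -- for c in r'…': pathpart = pathpart.replace(c, '')
  let p1 := scrubForbidden.foldl (fun s c => PySem.Str.replace s (String.singleton c) "") pathpart
  -- pathpart = pathpart.replace(' ', '_')
  let p2 := PySem.Str.replace p1 " " "_"
  if lowercase then PySem.Str.lower p2 else p2

-- ===== PORT B =====
-- the translation table of Source B as a character-level function: forbidden ↦ drop, ' ' ↦ '_', else keep
def scrubTranslate (c : Char) : Option Char :=
  if scrubForbidden.contains c then none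
  else if c == ' ' then some '_'
  else some c

def scrub_path_alt (pathpart : String) (lowercase : Bool) : String :=
  let result := String.ofList (pathpart.toList.filterMap scrubTranslate)
  if lowercase then PySem.Str.lower result else result

-- ===== PRECONDITION & SPEC =====
-- A's `assert pathpart` raises AssertionError on the empty string; Pre_ excludes it.
def Pre_scrub_path (pathpart : String) (lowercase : Bool) : Prop := pathpart ≠ ""
instance (pathpart : String) (lowercase : Bool) : Decidable (Pre_scrub_path pathpart lowercase) := by unfold Pre_scrub_path; infer_instance
def pvWitness_scrub_path : String × Bool := ("My Note [v2]", true)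

def Spec_scrub_path (pathpart : String) (lowercase : Bool) (out : String) : Prop := out = scrub_path_alt pathpart lowercase
instance (pathpart : String) (lowercase : Bool) (out : String) : Decidable (Spec_scrub_path pathpart lowercase out) := by unfold Spec_scrub_path; infer_instance

-- ===== CLAIM (what is proved, stated in full; the proofs are below) =====
def Claim_equal_scrub_path : Prop := ∀ (pathpart : String) (lowercase : Bool), Dom_scrub_path pathpart lowercase → Pre_scrub_path pathpart lowercase → Spec_scrub_path pathpart lowercase (scrub_path pathpart lowercase)

-- ===== LEMMAS AND PROOFS =====

-- replace.go with a single-char pattern and empty replacement filters that char out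
lemma go_single_empty (ch : Char) : ∀ (fuel : Nat) (l acc : List Char), l.length ≤ fuel →
    PySem.Chars.replace.go [ch] [] fuel l acc = acc.reverse ++ l.filter (fun c => !(c == ch)) := by
  intro fuel
  induction fuel with
  | zero => intro l acc h; cases l with
    | nil => simp [PySem.Chars.replace.go]
    | cons c t => simp at h
  | succ n ih =>
    intro l acc h
    cases l with
    | nil => simp [PySem.Chars.replace.go]
    | cons c t =>
      have ht : t.length ≤ n := by simpa using h
      by_cases heq : ch = c
      · subst heq
        simp [PySem.Chars.replace.go, List.isPrefixOf, ih t _ ht]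
      · simp [PySem.Chars.replace.go, List.isPrefixOf, heq, Ne.symm heq, ih t _ ht]

lemma go_single_single (ch d : Char) : ∀ (fuel : Nat) (l acc : List Char), l.length ≤ fuel →
    PySem.Chars.replace.go [ch] [d] fuel l acc = acc.reverse ++ l.map (fun c => if c == ch then d else c) := by
  intro fuel
  induction fuel with
  | zero => intro l acc h; cases l with
    | nil => simp [PySem.Chars.replace.go]
    | cons c t => simp at h
  | succ n ih =>
    intro l acc h
    cases l with
    | nil => simp [PySem.Chars.replace.go]
    | cons c t =>
      have ht : t.length ≤ n := by simpa using h
      by_cases heq : ch = c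
      · subst heq
        simp [PySem.Chars.replace.go, List.isPrefixOf, ih t _ ht]
      · simp [PySem.Chars.replace.go, List.isPrefixOf, heq, Ne.symm heq, ih t _ ht]

lemma replace_single_empty (l : List Char) (ch : Char) :
    PySem.Chars.replace l [ch] [] = l.filter (fun c => !(c == ch)) := by
  simp [PySem.Chars.replace, go_single_empty ch l.length l [] le_rfl]

lemma replace_single_single (l : List Char) (ch d : Char) :
    PySem.Chars.replace l [ch] [d] = l.map (fun c => if c == ch then d else c) := by
  simp [PySem.Chars.replace, go_single_single ch d l.length l [] le_rfl]

-- folding single-char removals over a list of characters = one filter by non-membership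
lemma foldl_replace_filter (cs : List Char) : ∀ (s : String),
    (cs.foldl (fun s c => PySem.Str.replace s (String.singleton c) "") s).toList
      = s.toList.filter (fun c => !(cs.contains c)) := by
  induction cs with
  | nil => intro s; simp
  | cons c t ih =>
    intro s
    simp only [List.foldl_cons, ih, List.contains_cons]
    have h1 : (PySem.Str.replace s (String.singleton c) "").toList
        = s.toList.filter (fun x => !(x == c)) := by
      simpa [String.singleton] using replace_single_empty s.toList c
    rw [h1, List.filter_filter]
    apply List.filter_congr
    intro x _
    by_cases hx : x == c <;> simp [hx]

-- filter by non-membership then map-space = filterMap through the translation table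
lemma filter_map_eq_filterMap (l : List Char) :
    (l.filter (fun c => !(scrubForbidden.contains c))).map (fun c => if c == ' ' then '_' else c)
      = l.filterMap scrubTranslate := by
  induction l with
  | nil => rfl
  | cons c t ih =>
    simp only [List.contains_eq_mem, beq_iff_eq] at ih ⊢
    have hsp : (' ' : Char) ∉ scrubForbidden := by decide
    by_cases hf : c ∈ scrubForbidden
    · simp [scrubTranslate, hf, ih]
    · by_cases hs : c = ' '
      · subst hs; simp [scrubTranslate, hsp, ih]
      · simp [scrubTranslate, hf, hs, ih]

lemma scrub_toList_eq (pathpart : String) :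
    (PySem.Str.replace
      (scrubForbidden.foldl (fun s c => PySem.Str.replace s (String.singleton c) "") pathpart)
      " " "_").toList = pathpart.toList.filterMap scrubTranslate := by
  have h2 : ∀ (s : String), (PySem.Str.replace s " " "_").toList
      = s.toList.map (fun c => if c == ' ' then '_' else c) := by
    intro s
    simpa using replace_single_single s.toList ' ' '_'
  rw [h2, foldl_replace_filter, filter_map_eq_filterMap]

-- ===== VERDICT (by name: the statement is the Claim_ definition above) =====
theorem scrub_path_spec : Claim_equal_scrub_path := by
  intro pathpart lowercase _ _
  unfold Spec_scrub_path scrub_path scrub_path_alt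
  have h := scrub_toList_eq pathpart
  cases lowercase with
  | false =>
    simp only [Bool.false_eq_true, if_false]
    apply String.ext
    simpa using h
  | true =>
    simp only [if_true]
    apply String.ext
    simp only [PySem.Str.toList_lower]
    rw [h]; simp
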